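-- pv_equiv track=rewrite | github.com/quantum2409/Eavesdropping101 | Assignment 2/220969/eavesdropping_assignment2.py | permutation_decrypt
-- ===== SOURCE A (Python) =====
-- def permutation_decrypt(line):
--     block_size = 5
--     key = [4, 3, 5, 1, 2]
--     result = ''
--     special_chars = []
--
--     for i, char in enumerate(line):
--         if not char.isalpha():
--             special_chars.append((i, char))
--
--     line = ''.join(char for char in line if char.isalpha())
--
--     num_blocks = len(line) // block_size
--
--     for i in range(num_blocks):
--         start_index = i * block_size
--         block = line[start_index:start_index + block_size]
--
--         permuted_block = [block[key[j] - 1] for j in range(block_size)]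
--         result += ''.join(permuted_block)
--
--     remaining_chars = line[num_blocks * block_size:]
--     result += remaining_chars
--
--     for pos, char in special_chars:
--         result = result[:pos] + char + result[pos:]
--
--     return result
-- ===== SOURCE B (Python) =====
-- def permutation_decrypt(line):
--     # One pass: permute the alpha stream chunk by chunk, then refill the
--     # alpha positions of the original line from that stream (no quadratic
--     # middle-of-string insertions).
--     alpha = [c for c in line if c.isalpha()]
--     perm = []
--     for i in range(0, len(alpha) - 4, 5):
--         a, b, c, d, e = alpha[i:i + 5]
--         perm += (d, c, e, a, b)
--     perm += alpha[len(alpha) - len(alpha) % 5:]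
--     it = iter(perm)
--     return ''.join(next(it) if ch.isalpha() else ch for ch in line)
-- ===== Notes on version B (the rewrite author's own statement) =====
-- stated objective: faster
-- what changed: A rebuilds the result by inserting each non-alpha character with string slicing (quadratic rebuilds) after an index-arithmetic block loop; B permutes the alpha stream in one chunk-by-chunk pass and refills the alpha positions of the original line in a single pass, never inserting into the middle of a string.
import Mathlib
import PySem

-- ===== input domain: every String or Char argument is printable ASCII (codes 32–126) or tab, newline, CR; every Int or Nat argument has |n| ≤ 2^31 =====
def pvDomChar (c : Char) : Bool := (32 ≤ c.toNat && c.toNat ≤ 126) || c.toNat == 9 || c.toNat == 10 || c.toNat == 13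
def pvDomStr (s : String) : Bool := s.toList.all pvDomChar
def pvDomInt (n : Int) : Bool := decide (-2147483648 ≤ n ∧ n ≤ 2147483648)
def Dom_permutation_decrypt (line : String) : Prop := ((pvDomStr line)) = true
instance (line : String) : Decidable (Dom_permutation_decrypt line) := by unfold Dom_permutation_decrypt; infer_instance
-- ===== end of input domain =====

-- B replaces A's quadratic rebuild-by-insertion with a single chunk-permutation pass
-- and a single refill pass over the original line (objective: faster).

-- ===== PORT A =====
-- Loop body of A's final insertion loop: result = result[:pos] + char + result[pos:]
def pvIns (r : List Char) (pc : Int × Char) : List Char :=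
  PySem.List.slice r none (some pc.1) ++ [pc.2] ++ PySem.List.slice r (some pc.1) none

def permutation_decrypt (line : String) : String :=
  let blockSize : Int := 5
  let key : List Int := [4, 3, 5, 1, 2]
  let L : List Char := line.toList
  -- for i, char in enumerate(line): if not char.isalpha(): special_chars.append((i, char))
  let specials : List (Int × Char) :=
    (PySem.List.enumerate L 0).foldl
      (fun acc p => if ¬ (PySem.Chars.isalpha p.2 = true) then acc ++ [p] else acc) []
  -- line = ''.join(char for char in line if char.isalpha())
  let L2 : List Char := L.filter (fun c => PySem.Chars.isalpha c)
  let numBlocks : Int := PySem.Int.floordiv ((L2.length : Int)) blockSize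
  -- block loop; block[key[j]-1] is ported with pyGetD (the index 0..4 is always in
  -- range for a full block, so the default ' ' is never produced)
  let permuted : List Char :=
    (PySem.List.pyRange 0 numBlocks 1).foldl
      (fun acc i =>
        acc ++ (PySem.List.pyRange 0 blockSize 1).map
          (fun j => PySem.List.pyGetD
              (PySem.List.slice L2 (some (i * blockSize)) (some (i * blockSize + blockSize)))
              (PySem.List.pyGetD key j 0 - 1) ' ')) []
  let withRemainder := permuted ++ PySem.List.slice L2 (some (numBlocks * blockSize)) none
  String.ofList (specials.foldl pvIns withRemainder)

-- ===== PORT B =====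
-- the while-loop of Source B: take five alphas, emit them in the order d c e a b, advance by 5
def pvPermChunks : List Char → List Char
  | a :: b :: c :: d :: e :: rest => d :: c :: e :: a :: b :: pvPermChunks rest
  | rest => rest

-- the final join: next(it) at alpha positions, the original char elsewhere
def pvFill : List Char → List Char → List Char
  | [], _ => []
  | c :: rest, ps =>
    if PySem.Chars.isalpha c then
      match ps with
      | p :: ps' => p :: pvFill rest ps'
      | [] => []   -- unreachable: the permuted stream has one char per alpha position
    else c :: pvFill rest ps

def permutation_decrypt_alt (line : String) : String :=
  String.ofList (pvFill line.toList (pvPermChunks (line.toList.filter (fun c => PySem.Chars.isalpha c))))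

-- ===== PRECONDITION & SPEC =====
def Spec_permutation_decrypt (line : String) (out : String) : Prop := out = permutation_decrypt_alt line
instance (line : String) (out : String) : Decidable (Spec_permutation_decrypt line out) := by unfold Spec_permutation_decrypt; infer_instance

-- ===== CLAIM (what is proved, stated in full; the proofs are below) =====
def Claim_equal_permutation_decrypt : Prop := ∀ (line : String), Dom_permutation_decrypt line → Spec_permutation_decrypt line (permutation_decrypt line)

-- ===== LEMMAS AND PROOFS =====

lemma pvBlockMap (a b c d e : Char) :
    (PySem.List.pyRange 0 5 1).map
      (fun j => PySem.List.pyGetD ([a, b, c, d, e])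
        (PySem.List.pyGetD ([4, 3, 5, 1, 2] : List Int) j 0 - 1) ' ') = [d, c, e, a, b] := by
  rw [show PySem.List.pyRange 0 5 1 = [0, 1, 2, 3, 4] from by decide]
  simp [PySem.List.pyGetD, PySem.List.pyGet?, PySem.List.pyIdx?]

lemma pvPermChunks_length (L : List Char) : (pvPermChunks L).length = L.length := by
  induction L using pvPermChunks.induct <;> simp [pvPermChunks, *]

lemma pvDropFive (a b c d e : Char) (l : List Char) (n : Nat) :
    (a :: b :: c :: d :: e :: l).drop (n + 5) = l.drop n := by
  rw [show n + 5 = n + 4 + 1 from rfl, List.drop_succ_cons,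
      show n + 4 = n + 3 + 1 from rfl, List.drop_succ_cons,
      show n + 3 = n + 2 + 1 from rfl, List.drop_succ_cons,
      show n + 2 = n + 1 + 1 from rfl, List.drop_succ_cons,
      List.drop_succ_cons]

-- A's block loop + remainder computes exactly B's chunk permutation
lemma pvPermFlat (L : List Char) :
    (PySem.List.pyRange 0 ((L.length / 5 : Nat) : Int) 1).flatMap
      (fun i => (PySem.List.pyRange 0 5 1).map
        (fun j => PySem.List.pyGetD
          (PySem.List.slice L (some (i * 5)) (some (i * 5 + 5)))
          (PySem.List.pyGetD ([4, 3, 5, 1, 2] : List Int) j 0 - 1) ' '))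
      ++ L.drop (L.length / 5 * 5) = pvPermChunks L := by
  induction L using pvPermChunks.induct with
  | case1 a b c d e rest ih =>
    have hlen : (a :: b :: c :: d :: e :: rest : List Char).length / 5 = rest.length / 5 + 1 := by
      simp; omega
    rw [hlen]
    rw [show PySem.List.pyRange 0 ((rest.length / 5 + 1 : Nat) : Int) 1
          = 0 :: PySem.List.pyRange 1 ((rest.length / 5 + 1 : Nat) : Int) 1 from by
      rw [PySem.List.pyRange_one_cons (by positivity)]; norm_num]
    rw [List.flatMap_cons]
    have hblk0 : PySem.List.slice (a :: b :: c :: d :: e :: rest)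
        (some ((0 : Int) * 5)) (some ((0 : Int) * 5 + 5)) = [a, b, c, d, e] := by
      norm_num
      rw [PySem.List.slice_to _ (by norm_num)]
      rfl
    rw [hblk0, pvBlockMap]
    have htail : PySem.List.pyRange 1 ((rest.length / 5 + 1 : Nat) : Int) 1
        = (List.range (rest.length / 5)).map (fun k : Nat => (1 : Int) + (k : Int)) := by
      rw [PySem.List.pyRange_one,
        show (((rest.length / 5 + 1 : Nat) : Int) - 1).toNat = rest.length / 5 from by omega]
    rw [htail, List.flatMap_map]
    rw [show PySem.List.pyRange 0 ((rest.length / 5 : Nat) : Int) 1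
          = (List.range (rest.length / 5)).map (fun k : Nat => (0 : Int) + (k : Int)) from by
        rw [PySem.List.pyRange_one,
          show (((rest.length / 5 : Nat) : Int) - 0).toNat = rest.length / 5 from by omega],
        List.flatMap_map] at ih
    have hpw : ∀ k ∈ List.range (rest.length / 5),
        (PySem.List.pyRange 0 5 1).map
          (fun j => PySem.List.pyGetD
            (PySem.List.slice (a :: b :: c :: d :: e :: rest)
              (some ((1 + (k : Int)) * 5)) (some ((1 + (k : Int)) * 5 + 5)))
            (PySem.List.pyGetD ([4, 3, 5, 1, 2] : List Int) j 0 - 1) ' ')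
        = (PySem.List.pyRange 0 5 1).map
          (fun j => PySem.List.pyGetD
            (PySem.List.slice rest (some ((0 + (k : Int)) * 5)) (some ((0 + (k : Int)) * 5 + 5)))
            (PySem.List.pyGetD ([4, 3, 5, 1, 2] : List Int) j 0 - 1) ' ') := by
      intro k hk
      have hsl : PySem.List.slice (a :: b :: c :: d :: e :: rest)
            (some ((1 + (k : Int)) * 5)) (some ((1 + (k : Int)) * 5 + 5))
          = PySem.List.slice rest (some ((0 + (k : Int)) * 5)) (some ((0 + (k : Int)) * 5 + 5)) := by
        rw [show ((1 + (k : Int)) * 5) = ((k * 5 + 5 : Nat) : Int) from by push_cast; ring,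
            show ((k * 5 + 5 : Nat) : Int) + 5 = ((k * 5 + 5 : Nat) : Int) + ((5 : Nat) : Int) from by norm_num,
            PySem.List.slice_natCast_add,
            show ((0 + (k : Int)) * 5) = ((k * 5 : Nat) : Int) from by push_cast; ring,
            show ((k * 5 : Nat) : Int) + 5 = ((k * 5 : Nat) : Int) + ((5 : Nat) : Int) from by norm_num,
            PySem.List.slice_natCast_add]
        rw [pvDropFive]
      rw [hsl]
    rw [List.flatMap_congr hpw]
    rw [show (rest.length / 5 + 1) * 5 = rest.length / 5 * 5 + 5 from by ring, pvDropFive]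
    simp only [List.append_assoc, ih]
    simp [pvPermChunks]
  | case2 rest h =>
    match rest, h with
    | [], _ => simp [pvPermChunks, PySem.List.pyRange_one_eq_nil]
    | [a], _ => simp [pvPermChunks, PySem.List.pyRange_one_eq_nil]
    | [a,b], _ => simp [pvPermChunks, PySem.List.pyRange_one_eq_nil]
    | [a,b,c], _ => simp [pvPermChunks, PySem.List.pyRange_one_eq_nil]
    | [a,b,c,d], _ => simp [pvPermChunks, PySem.List.pyRange_one_eq_nil]
    | a::b::c::d::e::r, h => exact absurd rfl (h a b c d e r)

lemma pvEnumShift (L : List Char) (s : Int) :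
    PySem.List.enumerate L (s + 1) = (PySem.List.enumerate L s).map (fun p => (p.1 + 1, p.2)) := by
  induction L generalizing s with
  | nil => simp [PySem.List.enumerate_nil]
  | cons c L ih => simp [PySem.List.enumerate_cons, ih]

lemma pvShiftFold (sp : List (Int × Char)) (hnn : ∀ p ∈ sp, 0 ≤ p.1) :
    ∀ (P : List Char) (x : Char),
      (sp.map (fun p => (p.1 + 1, p.2))).foldl pvIns (x :: P) = x :: sp.foldl pvIns P := by
  induction sp with
  | nil => simp
  | cons q sp ih =>
    intro P x
    have hq : 0 ≤ q.1 := hnn q (by simp)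
    have hnn' : ∀ p ∈ sp, 0 ≤ p.1 := fun p hp => hnn p (by simp [hp])
    have hins : pvIns (x :: P) (q.1 + 1, q.2) = x :: pvIns P q := by
      unfold pvIns
      rw [PySem.List.slice_to _ (by omega), PySem.List.slice_from _ (by omega),
        PySem.List.slice_to _ hq, PySem.List.slice_from _ hq]
      rw [show (q.1 + 1).toNat = q.1.toNat + 1 from by omega]
      simp [List.take_succ_cons, List.drop_succ_cons]
    simp only [List.map_cons, List.foldl_cons, hins, ih hnn']

-- A's insertion loop over the collected specials is B's refill pass
lemma pvInsFill : ∀ (L P : List Char),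
    P.length = (L.filter (fun c => PySem.Chars.isalpha c)).length →
    ((PySem.List.enumerate L 0).filter
        (fun p => decide ¬ (PySem.Chars.isalpha p.2 = true))).foldl pvIns P = pvFill L P := by
  intro L
  induction L with
  | nil =>
    intro P hP
    simp at hP
    simp [PySem.List.enumerate_nil, pvFill, hP]
  | cons c L ih =>
    intro P hP
    rw [PySem.List.enumerate_cons, show (0 : Int) + 1 = 0 + 1 from rfl, pvEnumShift]
    rw [List.filter_cons, List.filter_map]
    simp only [Function.comp_def]
    have hnn : ∀ p ∈ (PySem.List.enumerate L 0).filter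
        (fun p => decide ¬ (PySem.Chars.isalpha p.2 = true)), 0 ≤ p.1 := by
      intro p hp
      have := (List.mem_filter.mp hp).1
      rcases (PySem.List.mem_enumerate_iff _ _ _).mp this with ⟨k, hk, rfl⟩
      simp
    by_cases ha : PySem.Chars.isalpha c = true
    · rw [if_neg (by simp [ha])]
      rw [List.filter_cons_of_pos (by simp [ha])] at hP
      cases P with
      | nil => simp at hP
      | cons p P' =>
        rw [pvShiftFold _ hnn P' p]
        simp only [pvFill, ha, if_true]
        exact congrArg _ (ih P' (by simpa using hP))
    · rw [if_pos (by simp [ha])]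
      rw [List.foldl_cons]
      have h0 : pvIns P (0, c) = c :: P := by
        unfold pvIns
        rw [PySem.List.slice_to _ (by omega), PySem.List.slice_from _ (by omega)]
        simp
      rw [h0, pvShiftFold _ hnn P c]
      rw [List.filter_cons_of_neg (by simp [ha])] at hP
      simp only [pvFill, if_neg ha]
      exact congrArg _ (ih P hP)

-- ===== VERDICT (by name: the statement is the Claim_ definition above) =====
theorem permutation_decrypt_spec : Claim_equal_permutation_decrypt := by
  intro line _
  unfold Spec_permutation_decrypt permutation_decrypt permutation_decrypt_alt
  simp only []
  apply congrArg
  rw [show PySem.Int.floordiv (((line.toList.filter (fun c => PySem.Chars.isalpha c)).length : Nat) : Int) 5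
        = (((line.toList.filter (fun c => PySem.Chars.isalpha c)).length / 5 : Nat) : Int) from by
      exact_mod_cast PySem.Int.floordiv_natCast _ 5]
  rw [PySem.List.foldl_append_eq_flatMap, List.nil_append]
  rw [show (((line.toList.filter (fun c => PySem.Chars.isalpha c)).length / 5 : Nat) : Int) * (5 : Int)
        = (((line.toList.filter (fun c => PySem.Chars.isalpha c)).length / 5 * 5 : Nat) : Int) from by
      push_cast; ring]
  rw [PySem.List.slice_from_natCast]
  rw [pvPermFlat]
  rw [PySem.List.foldl_append_ite_eq_filter, List.nil_append]
  exact pvInsFill _ _ (by rw [pvPermChunks_length])
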